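-- pv_equiv track=rewrite | github.com/HugoBoulanger/ChatEval-AMT-Interface | python/analysis/agreement.py | get_annotator_tab
-- ===== SOURCE A (Python) =====
-- def get_annotator_tab(annotations, nb_min_rating=None):
--     if not nb_min_rating:
--         all_uid = list(annotations)
--     else:
--         all_uid = [uid for uid, ratings in annotations.items() if len(ratings) >= nb_min_rating]
--     annotators = []
--     data = []
--     for uid, rating_per_annotator in annotations.items():
--         if uid in all_uid:
--             for annotator, rating in rating_per_annotator.items():
--                 if annotator not in annotators:
--                     annotators.append(annotator)
--                     data.append([None] * len(all_uid))
--                 data[annotators.index(annotator)][all_uid.index(uid)] = rating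
--     return data
-- ===== SOURCE B (Python) =====
-- def get_annotator_tab(annotations, nb_min_rating=None):
--     if not nb_min_rating:
--         all_uid = list(annotations)
--     else:
--         all_uid = [uid for uid, ratings in annotations.items() if len(ratings) >= nb_min_rating]
--     # discover annotators in first-appearance order over the kept uids
--     seen = set()
--     annotators = []
--     for uid in all_uid:
--         for annotator in annotations[uid]:
--             if annotator not in seen:
--                 seen.add(annotator)
--                 annotators.append(annotator)
--     # no intermediate table: each cell is read directly from the input
--     return [[annotations[uid].get(annotator) for uid in all_uid]
--             for annotator in annotators]
-- ===== Notes on version B (the rewrite author's own statement) =====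
-- stated objective: alternative
-- what changed: B builds no intermediate table at all: it derives the annotator order in one discovery pass over the kept uids and then emits each cell by looking it up directly in the input dict annotations[uid].get(annotator), instead of A's incremental construction that grows rows and scatters in-place writes addressed by list.index.
import Mathlib
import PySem

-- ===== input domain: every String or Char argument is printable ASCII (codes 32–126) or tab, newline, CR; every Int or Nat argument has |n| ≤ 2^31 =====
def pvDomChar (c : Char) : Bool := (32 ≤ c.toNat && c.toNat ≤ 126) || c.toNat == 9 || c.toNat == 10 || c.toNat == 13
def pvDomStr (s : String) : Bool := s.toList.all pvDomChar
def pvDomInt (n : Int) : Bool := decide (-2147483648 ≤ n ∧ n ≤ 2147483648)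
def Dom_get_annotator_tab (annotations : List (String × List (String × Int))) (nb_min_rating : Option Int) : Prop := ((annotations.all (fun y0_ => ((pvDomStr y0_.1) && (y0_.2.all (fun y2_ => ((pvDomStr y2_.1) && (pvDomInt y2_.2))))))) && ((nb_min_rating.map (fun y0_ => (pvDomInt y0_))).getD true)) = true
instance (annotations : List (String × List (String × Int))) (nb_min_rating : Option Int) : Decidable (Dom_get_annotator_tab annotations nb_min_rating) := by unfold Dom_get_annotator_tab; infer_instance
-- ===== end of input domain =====

-- B builds no intermediate table: it derives the annotator order in one discovery pass and then
-- reads every cell directly from the input dicts (alternative decomposition, no in-place writes).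

-- ===== PORT A =====
-- shared input conversion: the Python argument is a dict of dicts, received identically by A and B
def pyItems (annotations : List (String × List (String × Int))) : List (String × PySem.Dict String Int) :=
  (PySem.Dict.ofList annotations).items.map (fun p => (p.1, PySem.Dict.ofList p.2))

-- 'if not nb_min_rating: all_uid = list(annotations) else: [uid for uid, ratings in … if len(ratings) >= nb]'
-- (this code is identical in A's source and in B's source, hence a shared helper)
def pyAllUid (items : List (String × PySem.Dict String Int)) (nb_min_rating : Option Int) : List String :=
  match nb_min_rating with
  | none => items.map (·.1)
  | some n =>
    if n = 0 then items.map (·.1)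
    else (items.filter (fun p => decide (n ≤ (p.2.size : Int)))).map (·.1)

-- body of A's inner 'for annotator, rating in rating_per_annotator.items(): …'
def stepA (all_uid : List String) (uid : String)
    (st : List String × List (List (Option Int))) (ar : String × Int) :
    List String × List (List (Option Int)) :=
  let annots := if st.1.contains ar.1 then st.1 else st.1 ++ [ar.1]
  let data := if st.1.contains ar.1 then st.2 else st.2 ++ [List.replicate all_uid.length (none : Option Int)]
  let i := (PySem.List.index? annots ar.1).getD 0       -- annotators.index(annotator); always found
  let j := (PySem.List.index? all_uid uid).getD 0       -- all_uid.index(uid); guarded by 'uid in all_uid'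
  (annots, data.set i ((data.getD i []).set j (some ar.2)))

def get_annotator_tab (annotations : List (String × List (String × Int))) (nb_min_rating : Option Int) : List (List (Option Int)) :=
  let items := pyItems annotations
  let all_uid := pyAllUid items nb_min_rating
  (items.foldl (fun st p =>
      if all_uid.contains p.1 then p.2.items.foldl (stepA all_uid p.1) st else st)
    ([], [])).2

-- ===== PORT B =====
-- 'annotations[uid]': dict lookup = the (unique) matching entry of the outer dict's items
def innerOf (items : List (String × PySem.Dict String Int)) (u : String) : PySem.Dict String Int :=
  ((items.find? (fun p => p.1 == u)).map (·.2)).getD PySem.Dict.empty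

-- 'if annotator not in seen: seen.add(annotator); annotators.append(annotator)'
def addAnnotator (st : PySem.Set String × List String) (a : String) : PySem.Set String × List String :=
  if PySem.Set.contains st.1 a then st else (PySem.Set.add st.1 a, st.2 ++ [a])

def get_annotator_tab_alt (annotations : List (String × List (String × Int))) (nb_min_rating : Option Int) : List (List (Option Int)) :=
  let items := pyItems annotations
  let all_uid := pyAllUid items nb_min_rating
  let annotators := (all_uid.foldl (fun st u => (innerOf items u).keys.foldl addAnnotator st)
      ((PySem.Set.empty : PySem.Set String), ([] : List String))).2
  annotators.map (fun a => all_uid.map (fun u => (innerOf items u).get? a))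

-- ===== PRECONDITION & SPEC =====
def Spec_get_annotator_tab (annotations : List (String × List (String × Int))) (nb_min_rating : Option Int) (out : List (List (Option Int))) : Prop := out = get_annotator_tab_alt annotations nb_min_rating
instance (annotations : List (String × List (String × Int))) (nb_min_rating : Option Int) (out : List (List (Option Int))) : Decidable (Spec_get_annotator_tab annotations nb_min_rating out) := by unfold Spec_get_annotator_tab; infer_instance

-- ===== CLAIM (what is proved, stated in full; the proofs are below) =====
def Claim_equal_get_annotator_tab : Prop := ∀ (annotations : List (String × List (String × Int))) (nb_min_rating : Option Int), Dom_get_annotator_tab annotations nb_min_rating → Spec_get_annotator_tab annotations nb_min_rating (get_annotator_tab annotations nb_min_rating)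

-- ===== LEMMAS AND PROOFS =====

-- spec-level versions of the two accumulators
def annIns (l : List String) (a : String) : List String := if a ∈ l then l else l ++ [a]

def annAcc (items : List (String × PySem.Dict String Int)) (l : List String) (L : List String) : List String :=
  L.foldl (fun l u => (innerOf items u).keys.foldl annIns l) l

-- cell functions: f u a = current content of the cell (row a, column u)
def updF (f : String → String → Option Int) (u a : String) (v : Int) : String → String → Option Int :=
  fun x b => if x = u ∧ b = a then some v else f x b

def rowFun (all_uid : List String) (f : String → String → Option Int) (a : String) : List (Option Int) :=
  all_uid.map (fun u => f u a)

def finit (items : List (String × PySem.Dict String Int)) (P : List String) : String → String → Option Int :=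
  fun x b => if x ∈ P then (innerOf items x).get? b else none

theorem index?_getD_of_mem (l : List String) (x : String) (h : x ∈ l) :
    (PySem.List.index? l x).getD 0 = l.idxOf x := by
  induction l with
  | nil => simp at h
  | cons y ys ih =>
    by_cases hyx : y = x
    · subst hyx; rw [PySem.List.index?_cons_self]; simp
    · rw [PySem.List.index?_cons_of_ne ys hyx]
      have h2 : x ∈ ys := by
        rcases List.mem_cons.mp h with h1 | h2
        · exact absurd h1.symm hyx
        · exact h2
      have hx : PySem.List.index? ys x ≠ none := by
        simp [h2]
      rcases ho : PySem.List.index? ys x with _ | k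
      · exact absurd ho hx
      · have hih := ih h2
        simp only [ho, Option.getD_some, Option.map_some] at hih ⊢
        simp [hyx, ← hih]

theorem row_set (all_uid : List String) (hund : all_uid.Nodup) (u : String) (hu : u ∈ all_uid)
    (f : String → String → Option Int) (a : String) (v : Int) :
    (rowFun all_uid f a).set (all_uid.idxOf u) (some v) = rowFun all_uid (updF f u a v) a := by
  unfold rowFun
  have hlt : all_uid.idxOf u < all_uid.length := List.idxOf_lt_length_of_mem hu
  apply List.ext_getElem (by simp)
  intro k h1 h2
  have hk2 : k < all_uid.length := by simpa using h2
  simp only [List.getElem_set, List.getElem_map]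
  by_cases hkj : all_uid.idxOf u = k
  · subst hkj
    simp [List.getElem_idxOf hlt, updF]
  · have hne : all_uid[k] ≠ u := by
      intro he
      apply hkj
      have h3 : all_uid[all_uid.idxOf u] = all_uid[k] := by rw [List.getElem_idxOf hlt, he]
      exact (List.Nodup.getElem_inj_iff hund).mp h3
    simp [hkj, updF, hne]

theorem row_ne (all_uid : List String) (f : String → String → Option Int) (u a b : String) (v : Int)
    (hba : b ≠ a) : rowFun all_uid (updF f u a v) b = rowFun all_uid f b := by
  simp [rowFun, updF, hba]

theorem map_row_update (ann : List String) (g g' : String → List (Option Int))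
    (hnd : ann.Nodup) (a : String) (ha : a ∈ ann) (hg : ∀ x, x ≠ a → g' x = g x) :
    (ann.map g).set (ann.idxOf a) (g' a) = ann.map g' := by
  have hlt : ann.idxOf a < ann.length := List.idxOf_lt_length_of_mem ha
  apply List.ext_getElem (by simp)
  intro k h1 h2
  have hk : k < ann.length := by simpa using h1
  simp only [List.getElem_set, List.getElem_map]
  by_cases hki : ann.idxOf a = k
  · subst hki; simp [List.getElem_idxOf hlt]
  · have hne : ann[k] ≠ a := by
      intro he
      apply hki
      have h3 : ann[ann.idxOf a] = ann[k] := by rw [List.getElem_idxOf hlt, he]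
      exact (List.Nodup.getElem_inj_iff hnd).mp h3
    simp [hki, hg _ hne]

theorem getD_map_row (ann : List String) (g : String → List (Option Int)) (i : Nat)
    (hi : i < ann.length) : (ann.map g).getD i [] = g (ann[i]) := by
  rw [List.getD_eq_getElem?_getD, List.getElem?_eq_getElem (by simpa using hi)]
  simp

theorem mem_annIns (l : List String) (a x : String) : x ∈ annIns l a ↔ x ∈ l ∨ x = a := by
  unfold annIns; split_ifs with h
  · constructor
    · exact Or.inl
    · rintro (h1 | rfl) <;> [exact h1; exact h]
  · simp

theorem nodup_annIns (l : List String) (a : String) (h : l.Nodup) : (annIns l a).Nodup := by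
  unfold annIns; split_ifs with hm
  · exact h
  · rw [List.nodup_append]
    exact ⟨h, List.nodup_singleton a, by
      intro y hy z hz
      simp only [List.mem_singleton] at hz
      subst hz
      exact fun he => hm (he ▸ hy)⟩

-- one stepA, on a state described by (ann, cell function f)
theorem stepA_inv (all_uid : List String) (u : String) (hund : all_uid.Nodup) (hu : u ∈ all_uid)
    (f : String → String → Option Int) (ann : List String)
    (hnd : ann.Nodup) (hfr : ∀ b, b ∉ ann → ∀ x, f x b = none) (a : String) (v : Int) :
    stepA all_uid u (ann, ann.map (rowFun all_uid f)) (a, v)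
      = (annIns ann a, (annIns ann a).map (rowFun all_uid (updF f u a v))) := by
  have hj : (PySem.List.index? all_uid u).getD 0 = all_uid.idxOf u := index?_getD_of_mem _ _ hu
  by_cases hc : a ∈ ann
  · have hc' : ann.contains a = true := by simpa [List.contains_iff_mem] using hc
    have hlt : ann.idxOf a < ann.length := List.idxOf_lt_length_of_mem hc
    have hi : (PySem.List.index? ann a).getD 0 = ann.idxOf a := index?_getD_of_mem _ _ hc
    have hIns : annIns ann a = ann := by simp [annIns, hc]
    have hgd : (ann.map (rowFun all_uid f)).getD (ann.idxOf a) [] = rowFun all_uid f a := by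
      rw [getD_map_row _ _ _ hlt, List.getElem_idxOf hlt]
    simp only [stepA, hc', if_pos, hi, hj, hIns, hgd]
    rw [row_set all_uid hund u hu f a v,
        map_row_update ann _ _ hnd a hc (fun x hx => row_ne all_uid f u a x v hx)]
  · have hc' : ann.contains a = false := by simpa [List.contains_iff_mem] using hc
    have hIns : annIns ann a = ann ++ [a] := by simp [annIns, hc]
    have hi : (PySem.List.index? (ann ++ [a]) a).getD 0 = ann.length := by
      rw [PySem.List.index?_append_singleton_self ann a hc]; rfl
    have hlen : (ann.map (rowFun all_uid f)).length = ann.length := by simp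
    have hblank : List.replicate all_uid.length (none : Option Int) = rowFun all_uid f a := by
      apply List.ext_getElem (by simp [rowFun])
      intro k h1 h2
      have hk : k < all_uid.length := by simpa using h1
      simp [rowFun, hfr a hc]
    have hgd : ((ann.map (rowFun all_uid f)) ++ [List.replicate all_uid.length (none : Option Int)]).getD
        ann.length [] = rowFun all_uid f a := by
      rw [← hlen]; simp [List.getD, hblank]
    simp only [stepA, hc', Bool.false_eq_true, if_false, hIns, hi, hj, hgd]
    rw [row_set all_uid hund u hu f a v]
    have hset : ((ann.map (rowFun all_uid f)) ++ [List.replicate all_uid.length (none : Option Int)]).set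
        ann.length (rowFun all_uid (updF f u a v) a)
        = ann.map (rowFun all_uid f) ++ [rowFun all_uid (updF f u a v) a] := by
      rw [← hlen]; simp
    rw [hset]
    have hmap : ann.map (rowFun all_uid f) = ann.map (rowFun all_uid (updF f u a v)) := by
      apply List.map_congr_left
      intro x hx
      exact (row_ne all_uid f u a x v (by rintro rfl; exact hc hx)).symm
    rw [hmap]; simp

-- the inner fold over one uid's pairs
theorem inner_inv (all_uid : List String) (u : String) (hund : all_uid.Nodup) (hu : u ∈ all_uid) :
    ∀ (pairs : List (String × Int)) (f : String → String → Option Int) (ann : List String),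
    ann.Nodup → (∀ b, b ∉ ann → ∀ x, f x b = none) →
    pairs.foldl (stepA all_uid u) (ann, ann.map (rowFun all_uid f))
      = ((pairs.map (·.1)).foldl annIns ann,
         ((pairs.map (·.1)).foldl annIns ann).map
           (rowFun all_uid (pairs.foldl (fun g q => updF g u q.1 q.2) f))) ∧
      ((pairs.map (·.1)).foldl annIns ann).Nodup ∧
      (∀ b, b ∉ (pairs.map (·.1)).foldl annIns ann → ∀ x,
        pairs.foldl (fun g q => updF g u q.1 q.2) f x b = none) := by
  intro pairs
  induction pairs with
  | nil => intro f ann hnd hfr; exact ⟨rfl, hnd, hfr⟩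
  | cons q rest ih =>
    intro f ann hnd hfr
    have hstep := stepA_inv all_uid u hund hu f ann hnd hfr q.1 q.2
    have hnd' : (annIns ann q.1).Nodup := nodup_annIns _ _ hnd
    have hfr' : ∀ b, b ∉ annIns ann q.1 → ∀ x, updF f u q.1 q.2 x b = none := by
      intro b hb x
      have hba : b ≠ q.1 := by
        intro h; exact hb ((mem_annIns _ _ _).mpr (Or.inr h))
      have hbm : b ∉ ann := fun h => hb ((mem_annIns _ _ _).mpr (Or.inl h))
      simp [updF, hba, hfr b hbm x]
    have := ih (updF f u q.1 q.2) (annIns ann q.1) hnd' hfr'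
    simpa [hstep] using this

theorem updMany_ne (u x b : String) (hx : x ≠ u) (pairs : List (String × Int))
    (f : String → String → Option Int) :
    pairs.foldl (fun g q => updF g u q.1 q.2) f x b = f x b := by
  induction pairs generalizing f with
  | nil => rfl
  | cons q rest ih => rw [List.foldl_cons, ih]; simp [updF, hx]

theorem updMany_col (u x b : String) (pairs : List (String × Int))
    (hb : b ∉ pairs.map (·.1)) (f : String → String → Option Int) :
    pairs.foldl (fun g q => updF g u q.1 q.2) f x b = f x b := by
  induction pairs generalizing f with
  | nil => rfl
  | cons q rest ih =>
    simp only [List.map_cons, List.mem_cons, not_or] at hb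
    rw [List.foldl_cons, ih hb.2]
    simp [updF, hb.1]

theorem updMany_get (u b : String) (pairs : List (String × Int))
    (hnd : (pairs.map (·.1)).Nodup) (f : String → String → Option Int) :
    pairs.foldl (fun g q => updF g u q.1 q.2) f u b
      = (pairs.find? (fun q => q.1 == b)).elim (f u b) (fun q => some q.2) := by
  induction pairs generalizing f with
  | nil => rfl
  | cons q rest ih =>
    simp only [List.map_cons, List.nodup_cons] at hnd
    by_cases hqb : q.1 = b
    · have hbr : b ∉ rest.map (·.1) := by rw [← hqb]; exact hnd.1
      rw [List.foldl_cons, updMany_col u u b rest hbr,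
          List.find?_cons_of_pos (by simpa using hqb)]
      simp [updF, hqb]
    · rw [List.foldl_cons, ih hnd.2, List.find?_cons_of_neg (by simpa using hqb)]
      have hupd : updF f u q.1 q.2 u b = f u b := by
        simp only [updF, true_and]
        exact if_neg (fun h : b = q.1 => hqb h.symm)
      rw [hupd]

-- after processing uid u's pairs, the cell function is exactly finit (P ++ [u])
theorem finit_step (items : List (String × PySem.Dict String Int)) (P : List String) (u : String)
    (hup : u ∉ P) (hink : ((innerOf items u).items.map (·.1)).Nodup) :
    (innerOf items u).items.foldl (fun g q => updF g u q.1 q.2) (finit items P)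
      = finit items (P ++ [u]) := by
  funext x b
  by_cases hx : x = u
  · subst hx
    rw [updMany_get x b _ hink]
    have h1 : finit items (P ++ [x]) x b = (innerOf items x).get? b := by
      simp [finit]
    have h2 : finit items P x b = none := by simp [finit, hup]
    rw [h1, h2]
    cases hf : (innerOf items x).items.find? (fun q => q.1 == b) with
    | none => simp [PySem.Dict.get?, hf]
    | some q => simp [PySem.Dict.get?, hf]
  · rw [updMany_ne u x b hx]
    have : (x ∈ P ++ [u]) ↔ x ∈ P := by simp [hx]
    simp [finit, this]

-- the outer fold over the kept uids
theorem outer_inv (items : List (String × PySem.Dict String Int)) (all_uid : List String)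
    (hund : all_uid.Nodup) (hink : ∀ u, ((innerOf items u).items.map (·.1)).Nodup) :
    ∀ (S P ann : List String), all_uid = P ++ S → ann.Nodup →
    (∀ b, b ∉ ann → ∀ x, finit items P x b = none) →
    S.foldl (fun st u => (innerOf items u).items.foldl (stepA all_uid u) st)
        (ann, ann.map (rowFun all_uid (finit items P)))
      = (annAcc items ann S, (annAcc items ann S).map (rowFun all_uid (finit items (P ++ S)))) := by
  intro S
  induction S with
  | nil => intro P ann _ _ _; simp [annAcc]
  | cons u rest ih =>
    intro P ann hsplit hnd hfr
    have hu : u ∈ all_uid := by rw [hsplit]; simp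
    have hup : u ∉ P := by
      have := hsplit ▸ hund
      rw [List.nodup_append] at this
      exact fun h => this.2.2 u h u List.mem_cons_self rfl
    have hinner := inner_inv all_uid u hund hu (innerOf items u).items (finit items P) ann hnd hfr
    obtain ⟨heq, hnd', hfr'⟩ := hinner
    rw [List.foldl_cons, heq]
    have hkeys : (innerOf items u).items.map (·.1) = (innerOf items u).keys := rfl
    have hf : (innerOf items u).items.foldl (fun g q => updF g u q.1 q.2) (finit items P)
        = finit items (P ++ [u]) := finit_step items P u hup (hink u)
    rw [hf] at hfr' ⊢
    have hsplit' : all_uid = (P ++ [u]) ++ rest := by rw [hsplit]; simp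
    have hrec := ih (P ++ [u]) (((innerOf items u).items.map (·.1)).foldl annIns ann) hsplit'
      hnd' hfr'
    rw [hrec]
    have hPS : (P ++ [u]) ++ rest = P ++ u :: rest := by simp
    rw [hPS]
    have hacc : annAcc items (((innerOf items u).items.map (·.1)).foldl annIns ann) rest
        = annAcc items ann (u :: rest) := rfl
    rw [hacc]

-- keys of items are pairwise distinct ⇒ pairs with equal keys are equal
theorem key_inj {β : Type} (items : List (String × β)) (hnd : (items.map (·.1)).Nodup)
    (p q : String × β) (hp : p ∈ items) (hq : q ∈ items) (h : p.1 = q.1) : p = q := by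
  induction items with
  | nil => simp at hp
  | cons r rest ih =>
    simp only [List.map_cons, List.nodup_cons] at hnd
    rcases List.mem_cons.mp hp with rfl | hp'
    · rcases List.mem_cons.mp hq with rfl | hq'
      · rfl
      · exact absurd (h ▸ List.mem_map_of_mem hq') hnd.1
    · rcases List.mem_cons.mp hq with rfl | hq'
      · exact absurd (h ▸ List.mem_map_of_mem hp') hnd.1
      · exact ih hnd.2 hp' hq'

theorem innerOf_self (items : List (String × PySem.Dict String Int))
    (hnd : (items.map (·.1)).Nodup) (p : String × PySem.Dict String Int) (hp : p ∈ items) :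
    innerOf items p.1 = p.2 := by
  have hfind : items.find? (fun q => q.1 == p.1) = some p := by
    rcases hf : items.find? (fun q => q.1 == p.1) with _ | q
    · exfalso
      have := List.find?_eq_none.mp hf p hp
      simp at this
    · have hq : q ∈ items := List.mem_of_find?_eq_some hf
      have hqp : q.1 = p.1 := by simpa using List.find?_some hf
      exact (key_inj items hnd q p hq hp hqp) ▸ hf
  simp [innerOf, hfind]

-- the uid filter predicate of A's 'all_uid' computation
def uidPred (nb : Option Int) (p : String × PySem.Dict String Int) : Bool :=
  match nb with
  | none => true
  | some n => decide (n = 0) || decide (n ≤ (p.2.size : Int))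

theorem pyAllUid_eq_filter (items : List (String × PySem.Dict String Int)) (nb : Option Int) :
    pyAllUid items nb = (items.filter (uidPred nb)).map (·.1) := by
  cases nb with
  | none =>
    show items.map (·.1) = (items.filter (uidPred none)).map (·.1)
    have hself : items.filter (uidPred none) = items :=
      List.filter_eq_self.mpr (fun p _ => rfl)
    rw [hself]
  | some n =>
    by_cases h0 : n = 0
    · subst h0
      have : ∀ p : String × PySem.Dict String Int, uidPred (some 0) p = true := by
        intro p; simp [uidPred]
      simp [pyAllUid, List.filter_eq_self.mpr (fun p _ => this p)]
    · have : ∀ p ∈ items, (decide (n ≤ (p.2.size : Int))) = uidPred (some n) p := by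
        intro p _; simp [uidPred, h0]
      simp only [pyAllUid, h0, if_false]
      rw [List.filter_congr this]

theorem all_uid_nodup' (items : List (String × PySem.Dict String Int)) (nb : Option Int)
    (hnd : (items.map (·.1)).Nodup) : (pyAllUid items nb).Nodup := by
  rw [pyAllUid_eq_filter]
  exact (List.Sublist.map _ List.filter_sublist).nodup hnd

theorem contains_all_uid (items : List (String × PySem.Dict String Int)) (nb : Option Int)
    (hnd : (items.map (·.1)).Nodup) (p : String × PySem.Dict String Int) (hp : p ∈ items) :
    (pyAllUid items nb).contains p.1 = uidPred nb p := by
  rw [pyAllUid_eq_filter]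
  by_cases h : uidPred nb p = true
  · have : p.1 ∈ (items.filter (uidPred nb)).map (·.1) :=
      List.mem_map_of_mem (List.mem_filter.mpr ⟨hp, h⟩)
    simp [this, h]
  · have : p.1 ∉ (items.filter (uidPred nb)).map (·.1) := by
      intro hm
      rcases List.mem_map.mp hm with ⟨q, hq, hq1⟩
      rcases List.mem_filter.mp hq with ⟨hq', hqP⟩
      rw [key_inj items hnd p q hp hq' hq1.symm] at h
      exact h hqP
    simp [this]
    simpa using h

-- A's guarded fold over items = plain fold over the kept uids
theorem A_fold_eq (items : List (String × PySem.Dict String Int)) (nb : Option Int)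
    (hnd : (items.map (·.1)).Nodup) (all_uid : List String) (hau : all_uid = pyAllUid items nb)
    (st : List String × List (List (Option Int))) :
    items.foldl (fun st p =>
        if all_uid.contains p.1 then p.2.items.foldl (stepA all_uid p.1) st else st) st
      = all_uid.foldl (fun st u => (innerOf items u).items.foldl (stepA all_uid u) st) st := by
  have h1 : items.foldl (fun st p =>
        if all_uid.contains p.1 then p.2.items.foldl (stepA all_uid p.1) st else st) st
      = (items.filter (fun p => all_uid.contains p.1)).foldl
          (fun st p => p.2.items.foldl (stepA all_uid p.1) st) st := by
    rw [List.foldl_filter]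
  have h2 : items.filter (fun p => all_uid.contains p.1) = items.filter (uidPred nb) := by
    apply List.filter_congr
    intro p hp
    rw [hau, contains_all_uid items nb hnd p hp]
  have h3 : items.filter (uidPred nb) = all_uid.map (fun u => (u, innerOf items u)) := by
    rw [hau, pyAllUid_eq_filter, List.map_map]
    symm
    have hcg : ∀ p ∈ items.filter (uidPred nb),
        ((fun u => (u, innerOf items u)) ∘ (·.1)) p = id p := by
      intro p hp
      have hp' : p ∈ items := List.mem_of_mem_filter hp
      simp only [Function.comp, id]
      rw [innerOf_self items hnd p hp']
    rw [List.map_congr_left hcg, List.map_id]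
  rw [h1, h2, h3, List.foldl_map]

theorem pyItems_keys_nodup (annotations : List (String × List (String × Int))) :
    ((pyItems annotations).map (·.1)).Nodup := by
  unfold pyItems
  have hnd : (PySem.Dict.ofList annotations).keys.Nodup := PySem.Dict.nodup_keys_ofList _
  simpa [PySem.Dict.keys, List.map_map, Function.comp] using hnd

theorem pyItems_inner_nodup (annotations : List (String × List (String × Int))) (u : String) :
    ((innerOf (pyItems annotations) u).items.map (·.1)).Nodup := by
  rcases hf : (pyItems annotations).find? (fun p => p.1 == u) with _ | p
  · simp [innerOf, hf, PySem.Dict.empty]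
  · have hp : p ∈ pyItems annotations := List.mem_of_find?_eq_some hf
    rcases List.mem_map.mp hp with ⟨q, _, hq⟩
    have : p.2 = PySem.Dict.ofList q.2 := by rw [← hq]
    have hnd : (PySem.Dict.ofList q.2).keys.Nodup := PySem.Dict.nodup_keys_ofList _
    simp only [innerOf, hf, Option.map_some, Option.getD_some]
    rw [this]
    simpa [PySem.Dict.keys] using hnd

-- B's annotator discovery = the annIns fold
theorem addAnn_keys (ks : List String) (s : PySem.Set String) (l : List String)
    (hco : ∀ x, x ∈ s ↔ x ∈ l) :
    ks.foldl addAnnotator (s, l) = (ks.foldl PySem.Set.add s, ks.foldl annIns l) ∧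
    (∀ x, x ∈ ks.foldl PySem.Set.add s ↔ x ∈ ks.foldl annIns l) := by
  induction ks generalizing s l with
  | nil => exact ⟨rfl, hco⟩
  | cons k rest ih =>
    have hstep : addAnnotator (s, l) k = (PySem.Set.add s k, annIns l k) := by
      by_cases hk : k ∈ l
      · have hks : k ∈ s := (hco k).mpr hk
        rw [show addAnnotator (s, l) k = (s, l) from by simp [addAnnotator, hks],
            PySem.Set.add_of_mem hks,
            show annIns l k = l from by simp [annIns, hk]]
      · have hks : k ∉ s := fun h => hk ((hco k).mp h)
        rw [show addAnnotator (s, l) k = (PySem.Set.add s k, l ++ [k]) from by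
              simp [addAnnotator, hks],
            show annIns l k = l ++ [k] from by simp [annIns, hk]]
    have hco' : ∀ x, x ∈ PySem.Set.add s k ↔ x ∈ annIns l k := by
      intro x
      rw [PySem.Set.mem_add, mem_annIns]
      exact or_congr (hco x) Iff.rfl
    have hrest := ih (PySem.Set.add s k) (annIns l k) hco'
    constructor
    · simp only [List.foldl_cons]
      rw [hstep, hrest.1]
    · simpa only [List.foldl_cons] using hrest.2

theorem B_ann_eq (items : List (String × PySem.Dict String Int)) (all_uid : List String) :
    (all_uid.foldl (fun st u => (innerOf items u).keys.foldl addAnnotator st)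
      ((PySem.Set.empty : PySem.Set String), ([] : List String))).2
      = annAcc items [] all_uid := by
  suffices h : ∀ (L : List String) (s : PySem.Set String) (l : List String),
      (∀ x, x ∈ s ↔ x ∈ l) →
      (L.foldl (fun st u => (innerOf items u).keys.foldl addAnnotator st) (s, l)).2
        = annAcc items l L by
    exact h all_uid PySem.Set.empty [] (by simp [PySem.Set.empty])
  intro L
  induction L with
  | nil => intro s l _; simp [annAcc]
  | cons u rest ih =>
    intro s l hco
    have := addAnn_keys ((innerOf items u).keys) s l hco
    rw [List.foldl_cons, this.1]
    rw [ih _ _ this.2]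
    simp [annAcc]

-- ===== VERDICT (by name: the statement is the Claim_ definition above) =====
theorem get_annotator_tab_spec : Claim_equal_get_annotator_tab := by
  intro annotations nb _
  unfold Spec_get_annotator_tab
  set items := pyItems annotations with hitems
  set all_uid := pyAllUid items nb with hau
  have hknd : (items.map (·.1)).Nodup := pyItems_keys_nodup annotations
  have hund : all_uid.Nodup := all_uid_nodup' items nb hknd
  have hink : ∀ u, ((innerOf items u).items.map (·.1)).Nodup :=
    fun u => pyItems_inner_nodup annotations u
  have houter := outer_inv items all_uid hund hink all_uid [] [] (by simp) List.nodup_nil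
      (by intro b _ x; simp [finit])
  simp only [List.map_nil, List.nil_append] at houter
  have hA : get_annotator_tab annotations nb
      = (items.foldl (fun st p =>
          if all_uid.contains p.1 then p.2.items.foldl (stepA all_uid p.1) st else st)
        ([], [])).2 := rfl
  have hB : get_annotator_tab_alt annotations nb
      = ((all_uid.foldl (fun st u => (innerOf items u).keys.foldl addAnnotator st)
          ((PySem.Set.empty : PySem.Set String), ([] : List String))).2).map
          (fun a => all_uid.map (fun u => (innerOf items u).get? a)) := rfl
  rw [hA, hB, A_fold_eq items nb hknd all_uid hau ([], []), houter, B_ann_eq items all_uid]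
  apply List.map_congr_left
  intro a _
  unfold rowFun
  apply List.map_congr_left
  intro u hu
  simp [finit, hu]
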